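-- pv_equiv track=rewrite | github.com/babetCode/personal-site | assets/file_tree_maker.py | format_filetree
-- ===== SOURCE A (Python) =====
-- def format_filetree(input_text):
--     lines = input_text.splitlines()  # Split the input into lines
--     stack = []  # Stack to track the levels of indentation
--     result = ["{{< filetree/container >}}"]  # Start with the container
--     base_indent = "    "  # Base indentation for all inner content
--
--     for line in lines:
--         stripped_line = line.lstrip()  # Word without indentation
--         if not stripped_line:  # Skip empty lines
--             continue
--
--         indentation = len(line) - len(stripped_line)  # Calculate indentation level
--
--         # Close open folders if the current indentation is less than the stack's last level
--         while stack and stack[-1] >= indentation: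
--             result.append(base_indent + " " * stack.pop() + "{{< /filetree/folder >}}")
--
--         # Add the folder to the result
--         result.append(base_indent + " " * indentation + f"{{{{< filetree/folder name=\"{stripped_line}\" >}}}}")
--
--         # Push the current indentation to the stack
--         stack.append(indentation)
--
--     # Close any remaining open folders
--     while stack:
--         result.append(base_indent + " " * stack.pop() + "{{< /filetree/folder >}}")
--
--     result.append("{{< /filetree/container >}}")  # Close the container
--     return "\n".join(result)
-- ===== SOURCE B (Python) =====
-- def format_filetree(input_text):
--     # Recursive-descent rendering over an explicit entry list instead of A's
--     # indentation stack: each node's children are the following run of strictly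
--     # deeper entries; emit open tag, children, close tag, then siblings.
--     entries = []
--     for line in input_text.splitlines():
--         name = line.lstrip()
--         if name:
--             entries.append((len(line) - len(name), name))
--
--     def render(es):
--         if not es:
--             return []
--         (d, name) = es[0]
--         children = []
--         siblings = es[1:]
--         while siblings and siblings[0][0] > d:
--             children.append(siblings[0])
--             siblings = siblings[1:]
--         pad = "    " + " " * d
--         return ([pad + f"{{{{< filetree/folder name=\"{name}\" >}}}}"]
--                 + render(children)
--                 + [pad + "{{< /filetree/folder >}}"]
--                 + render(siblings))
--
--     return "\n".join(["{{< filetree/container >}}"] + render(entries) + ["{{< /filetree/container >}}"])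
-- ===== Notes on version B (the rewrite author's own statement) =====
-- stated objective: alternative
-- what changed: Replaces A's single pass with an explicit indentation stack by first parsing lines into (indent, name) entries and then rendering a nested tree by recursive descent, where each node's children are the following run of strictly deeper entries.
import Mathlib
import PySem

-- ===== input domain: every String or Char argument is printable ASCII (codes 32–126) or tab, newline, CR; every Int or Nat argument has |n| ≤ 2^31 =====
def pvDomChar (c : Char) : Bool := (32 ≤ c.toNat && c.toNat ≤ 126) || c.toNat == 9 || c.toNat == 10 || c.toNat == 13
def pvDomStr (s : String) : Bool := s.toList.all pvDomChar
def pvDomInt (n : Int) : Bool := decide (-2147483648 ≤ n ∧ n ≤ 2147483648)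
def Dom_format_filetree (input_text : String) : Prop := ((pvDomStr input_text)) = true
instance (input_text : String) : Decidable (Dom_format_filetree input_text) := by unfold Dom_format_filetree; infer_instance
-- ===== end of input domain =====

-- B replaces A's explicit indentation stack with recursive-descent rendering over a
-- parsed (indent, name) entry list (children = following run of strictly deeper entries);
-- alternative decomposition, same output, no speed claim.


-- shared tag builders (the literal strings both Pythons build)
def openTag (d : Nat) (name : List Char) : List Char :=
  "    ".toList ++ List.replicate d ' ' ++ "{{< filetree/folder name=\"".toList ++ name ++ "\" >}}".toList

def closeTag (d : Nat) : List Char :=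
  "    ".toList ++ List.replicate d ' ' ++ "{{< /filetree/folder >}}".toList

-- ===== PORT A =====
-- the inner `while stack and stack[-1] >= indentation` loop (stack head = Python list end)
def popWhile (stack : List Nat) (d : Nat) (res : List (List Char)) : List Nat × List (List Char) :=
  match stack with
  | [] => ([], res)
  | t :: s => if d ≤ t then popWhile s d (res ++ [closeTag t]) else (t :: s, res)

-- one iteration of A's `for line in lines` loop
def aLine (st : List Nat × List (List Char)) (line : List Char) : List Nat × List (List Char) :=
  let stripped := PySem.Chars.lstrip line
  if stripped = [] then st
  else
    let d := line.length - stripped.length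
    let p := popWhile st.1 d st.2
    (d :: p.1, p.2 ++ [openTag d stripped])

-- the trailing `while stack` loop
def closeAll (stack : List Nat) (res : List (List Char)) : List (List Char) :=
  match stack with
  | [] => res
  | t :: s => closeAll s (res ++ [closeTag t])

def format_filetree (input_text : String) : String :=
  let lines := PySem.Chars.splitlines input_text.toList
  let st := lines.foldl aLine ([], ["{{< filetree/container >}}".toList])
  let res := closeAll st.1 st.2
  String.ofList (PySem.Chars.join "\n".toList (res ++ ["{{< /filetree/container >}}".toList]))

-- ===== PORT B =====
-- Source B's parsing loop: non-empty lines to (indent, name) entries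
def parseEntries : List (List Char) → List (Nat × List Char)
  | [] => []
  | l :: ls =>
      let name := PySem.Chars.lstrip l
      if name = [] then parseEntries ls
      else (l.length - name.length, name) :: parseEntries ls

-- Source B's render: the while-split of the tail into children/siblings is takeWhile/dropWhile
def render : List (Nat × List Char) → List (List Char)
  | [] => []
  | (d, name) :: rest =>
      let children := rest.takeWhile (fun e => decide (d < e.1))
      let siblings := rest.dropWhile (fun e => decide (d < e.1))
      [openTag d name] ++ render children ++ [closeTag d] ++ render siblings
termination_by es => es.length
decreasing_by
  · exact Nat.lt_succ_of_le (List.takeWhile_sublist _).length_le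
  · exact Nat.lt_succ_of_le (List.length_dropWhile_le _ _)

def format_filetree_alt (input_text : String) : String :=
  let entries := parseEntries (PySem.Chars.splitlines input_text.toList)
  String.ofList (PySem.Chars.join "\n".toList
    (["{{< filetree/container >}}".toList] ++ render entries ++ ["{{< /filetree/container >}}".toList]))

-- ===== PRECONDITION & SPEC =====
def Spec_format_filetree (input_text : String) (out : String) : Prop := out = format_filetree_alt input_text
instance (input_text : String) (out : String) : Decidable (Spec_format_filetree input_text out) := by unfold Spec_format_filetree; infer_instance

-- ===== CLAIM (what is proved, stated in full; the proofs are below) =====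
def Claim_equal_format_filetree : Prop := ∀ (input_text : String), Dom_format_filetree input_text → Spec_format_filetree input_text (format_filetree input_text)

-- ===== LEMMAS AND PROOFS =====

-- A's per-entry step, after the lstrip/skip of a line has been resolved
def entStep (st : List Nat × List (List Char)) (e : Nat × List Char) : List Nat × List (List Char) :=
  let p := popWhile st.1 e.1 st.2
  (e.1 :: p.1, p.2 ++ [openTag e.1 e.2])

theorem foldl_aLine_eq (lines : List (List Char)) :
    ∀ st, lines.foldl aLine st = (parseEntries lines).foldl entStep st := by
  induction lines with
  | nil => intro st; rfl
  | cons l ls ih =>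
      intro st
      simp only [List.foldl, parseEntries]
      by_cases h : PySem.Chars.lstrip l = []
      · simp [aLine, h, ih]
      · simp [aLine, h, entStep, ih]

theorem popWhile_eq (s : List Nat) (d : Nat) : ∀ acc,
    popWhile s d acc =
      (s.dropWhile (fun t => decide (d ≤ t)),
       acc ++ (s.takeWhile (fun t => decide (d ≤ t))).map closeTag) := by
  induction s with
  | nil => intro acc; simp [popWhile]
  | cons t s ih =>
      intro acc
      by_cases h : d ≤ t
      · simp [popWhile, h, ih]
      · simp [popWhile, h]

theorem closeAll_eq (s : List Nat) : ∀ acc, closeAll s acc = acc ++ s.map closeTag := by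
  induction s with
  | nil => intro acc; simp [closeAll]
  | cons t s ih => intro acc; simp [closeAll, ih]

-- A's tail computation from entry list `es` and stack `s`, written as a recursion
def afin : List (Nat × List Char) → List Nat → List (List Char)
  | [], s => s.map closeTag
  | (d, n) :: es, s =>
      (s.takeWhile (fun t => decide (d ≤ t))).map closeTag ++ [openTag d n]
        ++ afin es (d :: s.dropWhile (fun t => decide (d ≤ t)))

theorem afin_spec (es : List (Nat × List Char)) : ∀ (s : List Nat) (acc : List (List Char)),
    closeAll (es.foldl entStep (s, acc)).1 (es.foldl entStep (s, acc)).2 = acc ++ afin es s := by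
  induction es with
  | nil => intro s acc; simp [closeAll_eq, afin]
  | cons e es ih =>
      intro s acc
      obtain ⟨d, n⟩ := e
      simp only [List.foldl, entStep, popWhile_eq, afin]
      rw [ih]
      simp

theorem takeWhile_takeWhile_of_imp {α : Type} {p q : α → Bool}
    (h : ∀ a, p a = true → q a = true) (l : List α) :
    (l.takeWhile q).takeWhile p = l.takeWhile p := by
  induction l with
  | nil => rfl
  | cons a l ih =>
      by_cases hp : p a = true
      · simp [h a hp, hp, ih]
      · by_cases hq : q a = true <;>
          simp [hq, hp]

theorem dropWhile_takeWhile_of_imp {α : Type} {p q : α → Bool}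
    (h : ∀ a, p a = true → q a = true) (l : List α) :
    (l.takeWhile q).dropWhile p = (l.dropWhile p).takeWhile q := by
  induction l with
  | nil => rfl
  | cons a l ih =>
      by_cases hp : p a = true
      · simp [h a hp, hp, ih]
      · by_cases hq : q a = true <;>
          simp [hq, hp]

theorem dropWhile_dropWhile_of_imp {α : Type} {p q : α → Bool}
    (h : ∀ a, p a = true → q a = true) (l : List α) :
    (l.dropWhile p).dropWhile q = l.dropWhile q := by
  induction l with
  | nil => rfl
  | cons a l ih =>
      by_cases hp : p a = true
      · simp [h a hp, hp, ih]
      · simp [List.dropWhile_cons, hp]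

-- key lemma: A's stack processing from stack (d :: s) is B's render of the deeper run,
-- the close tag at d, then the rest against stack s
theorem afin_push (N : Nat) : ∀ (es : List (Nat × List Char)), es.length ≤ N →
    ∀ (d : Nat) (s : List Nat),
    afin es (d :: s) =
      render (es.takeWhile (fun e => decide (d < e.1))) ++ [closeTag d]
        ++ afin (es.dropWhile (fun e => decide (d < e.1))) s := by
  induction N with
  | zero =>
      intro es hes d s
      interval_cases h : es.length
      rw [List.length_eq_zero_iff] at h
      subst h
      simp [afin, render]
  | succ N ih =>
      intro es hes d s
      match es with
      | [] => simp [afin, render]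
      | (d', n) :: es' =>
          by_cases hdd : d < d'
          · have himp : ∀ e : Nat × List Char, decide (d' < e.1) = true → decide (d < e.1) = true := by
              intro e he; simp at he ⊢; omega
            have h1 : ¬ d' ≤ d := by omega
            simp only [afin, List.takeWhile_cons, List.dropWhile_cons]
            simp only [decide_eq_true_eq, h1, if_false, hdd, if_true, List.map_nil,
              List.nil_append]
            have hlen' : es'.length ≤ N := by simpa using hes
            rw [ih es' hlen' d' (d :: s)]
            have hlen2 : (es'.dropWhile (fun e => decide (d' < e.1))).length ≤ N :=
              le_trans (List.length_dropWhile_le _ _) hlen'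
            rw [ih _ hlen2 d s]
            -- unfold render on the cons
            have hrender : render ((d', n) :: es'.takeWhile (fun e => decide (d < e.1))) =
                [openTag d' n]
                  ++ render ((es'.takeWhile (fun e => decide (d < e.1))).takeWhile
                        (fun e => decide (d' < e.1)))
                  ++ [closeTag d']
                  ++ render ((es'.takeWhile (fun e => decide (d < e.1))).dropWhile
                        (fun e => decide (d' < e.1))) := by
              rw [render]
            rw [hrender,
              takeWhile_takeWhile_of_imp himp,
              dropWhile_takeWhile_of_imp himp,
              dropWhile_dropWhile_of_imp himp]
            simp
          · have h1 : d' ≤ d := by omega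
            have h2 : decide (d < d') = false := by simp; omega
            conv_lhs => rw [afin]
            simp only [List.takeWhile_cons, List.dropWhile_cons, h2, decide_eq_true_eq, h1,
              if_true, Bool.false_eq_true, if_false, List.map_cons, render, List.nil_append]
            rw [afin]
            simp
-- (d' ≤ d: the first entry pops d immediately, so the computation is the one from stack s)

theorem afin_nil (N : Nat) : ∀ (es : List (Nat × List Char)), es.length ≤ N →
    afin es [] = render es := by
  induction N with
  | zero =>
      intro es hes
      interval_cases h : es.length
      rw [List.length_eq_zero_iff] at h
      subst h
      simp [afin, render]
  | succ N ih =>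
      intro es hes
      match es with
      | [] => simp [afin, render]
      | (d, n) :: es' =>
          have hlen' : es'.length ≤ N := by simpa using hes
          rw [afin]
          simp only [List.takeWhile_nil, List.dropWhile_nil, List.map_nil, List.nil_append]
          rw [afin_push es'.length es' le_rfl d []]
          rw [ih _ (le_trans (List.length_dropWhile_le _ _) hlen')]
          rw [render]
          simp

-- ===== VERDICT (by name: the statement is the Claim_ definition above) =====
theorem format_filetree_spec : Claim_equal_format_filetree := by
  intro input_text _
  unfold Spec_format_filetree format_filetree format_filetree_alt
  dsimp only
  rw [foldl_aLine_eq]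
  have h := afin_spec (parseEntries (PySem.Chars.splitlines input_text.toList)) []
    ["{{< filetree/container >}}".toList]
  rw [h, afin_nil (parseEntries (PySem.Chars.splitlines input_text.toList)).length _ le_rfl]
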